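-- pv_equiv track=rewrite | github.com/gitvicky/walrus | walrus/data/inflated_dataset.py | _pad_cartesian_field_names
-- ===== SOURCE A (Python) =====
-- import itertools
-- from typing import TYPE_CHECKING, Callable, Dict, List, Optional, Tuple, cast
--
-- CARTESIAN_DIMS = ["x", "y", "z"]
--
-- def _pad_cartesian_field_names(
--     field_names: Dict[int, List[str]], padded_d: int
-- ):
--     """Repeats data over axes not used in storage"""
--     # Look at which dimensions currently are not used and tile based on their sizes
--     out_dict = dict()
--
--     for order, order_dict in field_names.items():
--         if order == 0:
--             out_dict[order] = order_dict
--         else: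
--             out_dict[order] = []
--             used_field_names = set()
--             # Create new extensions as product of cartesian dims
--             ti_field_dims = [
--                 "".join(xyz)
--                 for xyz in itertools.product(
--                     CARTESIAN_DIMS[:padded_d],
--                     repeat=order,
--                 )
--             ]
--             for field in order_dict:
--                 # Get name by truncating text after last "_"
--                 core_name = field.rsplit("_", 1)[0]
--                 # If first example, create fields up to padded_d
--                 if core_name not in used_field_names:
--                     out_dict[order].extend(
--                         [f"{core_name}_{dims}" for dims in ti_field_dims]
--                     )
--                 used_field_names.add(core_name)
--
--     return out_dict
-- ===== SOURCE B (Python) =====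
-- CARTESIAN_DIMS = ["x", "y", "z"]
--
--
-- def _decode_dims(i, order, pool, d):
--     """Suffix for flat index i: the digits of i in base d, big-endian, mapped through pool."""
--     s = ""
--     n = i
--     for _ in range(order):
--         n, r = divmod(n, d)
--         s = pool[r] + s
--     return s
--
--
-- def _pad_cartesian_field_names(field_names, padded_d):
--     """Repeats data over axes not used in storage (index-arithmetic rewrite)."""
--     pool = CARTESIAN_DIMS[:padded_d]
--     d = len(pool)
--     out_dict = {}
--     for order, names in field_names.items():
--         if order == 0:
--             out_dict[order] = names
--         else:
--             cores_all = [f.rsplit("_", 1)[0] for f in names]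
--             # first-occurrence dedup by positional test instead of a running seen-set
--             cores = [c for i, c in enumerate(cores_all) if c not in cores_all[:i]]
--             # enumerate suffixes by decoding flat indices 0..d**order-1 in base d
--             total = d ** order
--             out_dict[order] = [
--                 c + "_" + _decode_dims(i, order, pool, d)
--                 for c in cores
--                 for i in range(total)
--             ]
--     return out_dict
-- ===== Notes on version B (the rewrite author's own statement) =====
-- stated objective: alternative
-- what changed: B replaces A's interleaved seen-set loop and itertools.product tuple enumeration by index arithmetic and positional tests: unique core names are selected by checking each name against the prefix of names before it, and each dimension suffix is computed by decoding a flat index 0..d**order-1 in base d (divmod digits mapped through the dim pool) instead of materialising the cartesian product of tuples and joining them.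
import Mathlib
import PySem

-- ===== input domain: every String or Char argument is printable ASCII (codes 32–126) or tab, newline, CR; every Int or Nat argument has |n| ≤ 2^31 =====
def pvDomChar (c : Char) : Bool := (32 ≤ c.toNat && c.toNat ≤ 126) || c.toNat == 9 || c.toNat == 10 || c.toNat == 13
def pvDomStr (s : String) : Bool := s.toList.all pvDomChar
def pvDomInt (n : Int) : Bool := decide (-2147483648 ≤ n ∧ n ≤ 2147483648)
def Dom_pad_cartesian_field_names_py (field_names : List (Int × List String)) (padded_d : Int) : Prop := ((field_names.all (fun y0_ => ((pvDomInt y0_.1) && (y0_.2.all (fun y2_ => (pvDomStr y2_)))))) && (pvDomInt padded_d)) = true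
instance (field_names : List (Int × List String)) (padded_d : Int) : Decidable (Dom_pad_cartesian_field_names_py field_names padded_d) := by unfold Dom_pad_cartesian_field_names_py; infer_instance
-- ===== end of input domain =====

-- B replaces A's interleaved seen-set loop and itertools.product enumeration by index
-- arithmetic: unique cores are picked by a positional test against the prefix of earlier
-- names, and each dim suffix is decoded from a flat index in base d; objective: alternative.

-- ===== PORT A =====
def pvCartesianDims : List String := ["x", "y", "z"]

-- hand port of s.rsplit("_", 1)[0]: the text before the LAST '_', or all of s if
-- there is no '_' (exact on all strings; rsplit with maxsplit=1 never raises)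
def pvRsplitCore (s : String) : String :=
  match s.toList.reverse.findIdx? (· == '_') with
  | none => s
  | some k => String.ofList (s.toList.take (s.toList.length - k - 1))

-- itertools.product(pool, repeat=n), per its documented expansion:
-- result = [[]]; n times: result = [p+[x] for p in result for x in pool]
def pvProdTup (pool : List String) : Nat → List (List String)
  | 0 => [[]]
  | n + 1 => (pvProdTup pool n).flatMap (fun p => pool.map (fun x => p ++ [x]))

-- loop body of A's 'for order, order_dict in field_names.items()'
def pvStepA (padded_d : Int) (out_dict : PySem.Dict Int (List String)) (fn : Int × List String) : PySem.Dict Int (List String) :=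
  let order := fn.1
  let order_dict := fn.2
  if order == 0 then
    out_dict.insert order order_dict
  else
    let ti_field_dims : List String :=
      (pvProdTup (PySem.List.slice pvCartesianDims none (some padded_d)) order.toNat).map
        (fun xyz => PySem.Str.join "" xyz)
    let res := order_dict.foldl (fun (st : List String × PySem.Set String) field =>
        let core := pvRsplitCore field
        ((if PySem.Set.contains st.2 core then st.1
          else st.1 ++ ti_field_dims.map (fun dims => core ++ "_" ++ dims)),
         PySem.Set.add st.2 core)) ([], PySem.Set.empty)
    out_dict.insert order res.1

def pad_cartesian_field_names_py (field_names : List (Int × List String)) (padded_d : Int) : List (Int × List String) :=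
  (field_names.foldl (pvStepA padded_d) PySem.Dict.empty).items

-- ===== PORT B =====
-- _decode_dims(i, order, pool, d): digits of i in base d, big-endian, through pool.
-- pool[r] is never out of range when the loop runs (r = n % d < d = len(pool));
-- the '.getD ""' only makes the IndexError case total and is never taken.
def pvDecode (pool : List String) (d : Int) (order : Int) (i : Int) : String :=
  ((PySem.List.pyRange 0 order 1).foldl
    (fun (st : Int × String) _ =>
      (PySem.Int.floordiv st.1 d,
       ((PySem.List.pyGet? pool (PySem.Int.mod st.1 d)).getD "") ++ st.2))
    (i, "")).2

-- loop body of B's 'for order, names in field_names.items()' (pool, d hoisted out as in Source B)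
def pvStepB (pool : List String) (d : Int) (out_dict : PySem.Dict Int (List String)) (fn : Int × List String) : PySem.Dict Int (List String) :=
  let order := fn.1
  let names := fn.2
  if order == 0 then
    out_dict.insert order names
  else
    let cores_all := names.map (fun f => pvRsplitCore f)
    let cores := ((PySem.List.enumerate cores_all 0).filter
        (fun p => !((PySem.List.slice cores_all none (some p.1)).contains p.2))).map (·.2)
    -- total = d ** order (Python ** with a negative exponent leaves Int: outside Pre_)
    let total : Int := d ^ order.toNat
    out_dict.insert order (cores.flatMap (fun c =>
      (PySem.List.pyRange 0 total 1).map (fun i => c ++ "_" ++ pvDecode pool d order i)))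

def pad_cartesian_field_names_py_alt (field_names : List (Int × List String)) (padded_d : Int) : List (Int × List String) :=
  let pool := PySem.List.slice pvCartesianDims none (some padded_d)
  (field_names.foldl (pvStepB pool (pool.length : Int)) PySem.Dict.empty).items

-- ===== PRECONDITION & SPEC =====
-- Pre_ excludes exactly the inputs on which A raises: any dict key order < 0 makes
-- itertools.product(..., repeat=order) raise ValueError.
def Pre_pad_cartesian_field_names_py (field_names : List (Int × List String)) (padded_d : Int) : Prop :=
  ∀ p ∈ field_names, 0 ≤ p.1

instance (field_names : List (Int × List String)) (padded_d : Int) : Decidable (Pre_pad_cartesian_field_names_py field_names padded_d) := by unfold Pre_pad_cartesian_field_names_py; infer_instance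

def pvWitness_pad_cartesian_field_names_py : (List (Int × List String)) × Int :=
  ([(0, ["t"]), (2, ["u_x", "u_y", "v_z"])], 2)

def Spec_pad_cartesian_field_names_py (field_names : List (Int × List String)) (padded_d : Int) (out : List (Int × List String)) : Prop := out = pad_cartesian_field_names_py_alt field_names padded_d
instance (field_names : List (Int × List String)) (padded_d : Int) (out : List (Int × List String)) : Decidable (Spec_pad_cartesian_field_names_py field_names padded_d out) := by unfold Spec_pad_cartesian_field_names_py; infer_instance

-- ===== CLAIM (what is proved, stated in full; the proofs are below) =====
def Claim_equal_pad_cartesian_field_names_py : Prop := ∀ (field_names : List (Int × List String)) (padded_d : Int), Dom_pad_cartesian_field_names_py field_names padded_d → Pre_pad_cartesian_field_names_py field_names padded_d → Spec_pad_cartesian_field_names_py field_names padded_d (pad_cartesian_field_names_py field_names padded_d)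

-- ===== LEMMAS AND PROOFS =====

-- '"".join' with the empty separator is flattening
theorem pv_join_nil_flatten (ls : List (List Char)) : PySem.Chars.join [] ls = ls.flatten := by
  induction ls with
  | nil => simp [PySem.Chars.join_nil]
  | cons a ls ih =>
    cases ls with
    | nil => simp [PySem.Chars.join_singleton]
    | cons b rest => simp [PySem.Chars.join_cons_cons, ih]

theorem pv_join_snoc (p : List String) (x : String) :
    PySem.Str.join "" (p ++ [x]) = PySem.Str.join "" p ++ x := by
  simp [PySem.Str.join, pv_join_nil_flatten]

-- A's joined product, one suffix-extension step
theorem pv_prodJ_succ (pool : List String) (n : Nat) :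
    (pvProdTup pool (n+1)).map (PySem.Str.join "") =
      ((pvProdTup pool n).map (PySem.Str.join "")).flatMap (fun p => pool.map (fun x => p ++ x)) := by
  simp [pvProdTup, List.map_flatMap, List.flatMap_map, List.map_map, Function.comp_def, pv_join_snoc]

theorem pv_add_of_contains (s : PySem.Set String) (c : String) (h : PySem.Set.contains s c = true) :
    PySem.Set.add s c = s := by
  simp [PySem.Set.add, (PySem.Set.contains_iff s c).mp h]

theorem pv_add_of_not_contains (s : PySem.Set String) (c : String) (h : ¬ PySem.Set.contains s c = true) :
    PySem.Set.add s c = s ++ [c] := by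
  have hm : c ∉ s := fun hm => h ((PySem.Set.contains_iff s c).mpr hm)
  simp [PySem.Set.add, hm]

-- folding Set.add only ever appends on the right
theorem pv_foldl_add_prefix (xs : List String) (s : PySem.Set String) :
    ∃ t, xs.foldl PySem.Set.add s = s ++ t := by
  induction xs generalizing s with
  | nil => exact ⟨[], by simp⟩
  | cons c rest ih =>
    by_cases h : PySem.Set.contains s c
    · simpa [pv_add_of_contains s c h] using ih s
    · obtain ⟨t, ht⟩ := ih (s ++ [c])
      exact ⟨[c] ++ t, by simp [pv_add_of_not_contains s c h, ht]⟩

-- A's seen-set loop = expansion of the NEW elements collected by folding Set.add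
theorem pv_inner_fold_eq (expand : String → List String) (cores : List String)
    (acc : List String) (used : PySem.Set String) :
    (cores.foldl (fun st c =>
        ((if PySem.Set.contains st.2 c then st.1 else st.1 ++ expand c), PySem.Set.add st.2 c))
      (acc, used)).1
    = acc ++ ((cores.foldl PySem.Set.add used).drop used.length).flatMap expand := by
  induction cores generalizing acc used with
  | nil => simp
  | cons c rest ih =>
    by_cases h : PySem.Set.contains used c
    · simp only [List.foldl_cons, h, if_pos, pv_add_of_contains used c h]
      exact ih acc used
    · simp only [List.foldl_cons, h, if_neg, Bool.false_eq_true, not_false_iff,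
        pv_add_of_not_contains used c h]
      rw [ih]
      obtain ⟨t, ht⟩ := pv_foldl_add_prefix rest (used ++ [c])
      rw [ht]
      have h1 : ((used ++ [c]) ++ t).drop (used ++ [c]).length = t := by
        simpa using List.drop_left (used ++ [c]) t
      have h2 : ((used ++ [c]) ++ t).drop used.length = c :: t := by
        rw [List.append_assoc]
        simpa using List.drop_left used (c :: t)
      rw [h1, h2]
      simp [List.append_assoc]

-- B's positional first-occurrence filter, relative to an already-seen prefix
theorem pv_first_filter (xs : List String) : ∀ (pre : List String),
    ((PySem.List.enumerate xs (pre.length : Int)).filter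
        (fun p => !((PySem.List.slice (pre ++ xs) none (some p.1)).contains p.2))).map (·.2)
      = (PySem.Set.ofList xs).filter (fun y => !(pre.contains y)) := by
  induction xs with
  | nil => intro pre; simp [PySem.List.enumerate_nil]
  | cons c rest ih =>
    intro pre
    rw [PySem.List.enumerate_cons, PySem.Set.ofList_cons]
    have hsl : PySem.List.slice (pre ++ c :: rest) none (some (pre.length : Int)) = pre := by
      rw [PySem.List.slice_to _ (by exact_mod_cast Nat.zero_le _)]
      simp
    have htail :
        ((PySem.List.enumerate rest ((pre.length : Int) + 1)).filter
            (fun p => !((PySem.List.slice (pre ++ c :: rest) none (some p.1)).contains p.2))).map (·.2)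
          = (PySem.Set.ofList rest).filter (fun y => !((pre ++ [c]).contains y)) := by
      have h1 : ((pre ++ [c]).length : Int) = (pre.length : Int) + 1 := by
        simp [List.length_append]
      have h2 : (pre ++ [c]) ++ rest = pre ++ c :: rest := by
        simp [List.append_assoc]
      rw [← h1, ← h2]
      exact ih (pre ++ [c])
    -- pointwise: y ∉ pre ++ [c]  ↔  y ∉ pre ∧ y ≠ c  (as Bools)
    have hpt : (fun y : String => !((pre ++ [c]).contains y))
        = (fun y : String => !(y == c) && !(pre.contains y)) := by
      funext y
      by_cases hy : y = c <;> by_cases hp : y ∈ pre <;>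
        simp [hy, hp, List.contains_append, List.contains_eq_mem]
    have hE : ((PySem.List.enumerate rest ((pre.length : Int) + 1)).filter
          (fun p => !((PySem.List.slice (pre ++ c :: rest) none (some p.1)).contains p.2))).map (·.2)
        = ((PySem.Set.ofList rest).discard c).filter (fun y => !(pre.contains y)) := by
      rw [htail, hpt, PySem.Set.discard, List.filter_filter]
      exact List.filter_congr (fun a _ => Bool.and_comm _ _)
    rw [List.filter_cons, List.filter_cons, hsl]
    by_cases hc : pre.contains c
    · simp only [hc, Bool.not_true, Bool.false_eq_true, if_false, hE]
    · simp only [hc, Bool.not_false, if_true, List.map_cons, hE]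

-- B's dedup pass = PySem.Set.ofList
theorem pv_cores_eq (xs : List String) :
    ((PySem.List.enumerate xs 0).filter
        (fun p => !((PySem.List.slice xs none (some p.1)).contains p.2))).map (·.2)
      = PySem.Set.ofList xs := by
  have h := pv_first_filter xs []
  simpa using h

-- a list is the map of getD over the range of its length
theorem pv_pool_getD (pool : List String) :
    (List.range pool.length).map (fun r => pool.getD r "") = pool := by
  induction pool with
  | nil => simp
  | cons a l ih =>
    rw [List.length_cons, List.range_succ_eq_map]
    simpa [List.map_map, Function.comp_def] using ih

-- range(a*b) enumerated block-wise
theorem pv_range_mul (a b : Nat) :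
    List.range (a*b) = (List.range a).flatMap (fun q => (List.range b).map (fun r => q*b + r)) := by
  induction a with
  | zero => simp
  | succ a ih =>
    rw [Nat.succ_mul, List.range_add, List.range_succ, List.flatMap_append, ← ih]
    simp

-- specification-level big-endian base-(len pool) decoder
def pvD (pool : List String) : Nat → Nat → String
  | 0, _ => ""
  | k+1, i => pvD pool k (i / pool.length) ++ pool.getD (i % pool.length) ""

-- a fold that ignores the elements is an iterate
theorem pv_foldl_const {α β : Type} (f : β → β) (l : List α) (s : β) :
    l.foldl (fun s _ => f s) s = f^[l.length] s := by
  induction l generalizing s with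
  | nil => simp
  | cons a l ih => simp [ih, Function.iterate_succ_apply]

-- B's divmod loop computes pvD (string accumulates on the right)
theorem pv_iter_decode (pool : List String) (k : Nat) : ∀ (i : Nat) (s : String),
    ((fun st : Int × String => (PySem.Int.floordiv st.1 (pool.length : Int),
        ((PySem.List.pyGet? pool (PySem.Int.mod st.1 (pool.length : Int))).getD "") ++ st.2))^[k]
      (((i : Nat) : Int), s)).2 = pvD pool k i ++ s := by
  induction k with
  | zero => intro i s; simp [pvD]
  | succ k ih =>
    intro i s
    rw [Function.iterate_succ_apply]
    have h1 : PySem.Int.floordiv (i : Int) (pool.length : Int) = ((i / pool.length : Nat) : Int) :=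
      PySem.Int.floordiv_natCast i pool.length
    have h2 : PySem.Int.mod (i : Int) (pool.length : Int) = ((i % pool.length : Nat) : Int) :=
      PySem.Int.mod_natCast i pool.length
    simp only [h1, h2, PySem.List.pyGet?_natCast]
    rw [ih]
    rw [pvD, ← String.append_assoc, List.getD_eq_getElem?_getD]

-- B's index enumeration produces exactly A's joined tuple product
theorem pv_decode_eq_prod (pool : List String) (k : Nat) :
    (List.range (pool.length ^ k)).map (pvD pool k) = (pvProdTup pool k).map (PySem.Str.join "") := by
  induction k with
  | zero => simp [pvD, pvProdTup, PySem.Str.join, PySem.Chars.join_nil]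
  | succ k ih =>
    rcases Nat.eq_zero_or_pos pool.length with hd | hd
    · rw [List.length_eq_zero_iff.mp hd] at *
      simp [pvProdTup, pow_succ, hd]
    · rw [pow_succ, pv_range_mul, pv_prodJ_succ, ← ih]
      rw [List.map_flatMap, List.flatMap_map]
      simp only [List.map_map, Function.comp_def]
      have hmap : ∀ s : String, pool.map (fun x => s ++ x)
          = (List.range pool.length).map (fun r => s ++ pool.getD r "") := by
        intro s
        conv_lhs => rw [← pv_pool_getD pool]
        rw [List.map_map, Function.comp_def]
      apply List.flatMap_congr
      intro q _
      rw [hmap (pvD pool k q)]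
      apply List.map_congr_left
      intro r hr
      have hr' : r < pool.length := List.mem_range.mp hr
      rw [pvD]
      congr 2
      · rw [mul_comm, Nat.mul_add_div hd, Nat.div_eq_of_lt hr', Nat.add_zero]
      · rw [mul_comm, Nat.mul_add_mod, Nat.mod_eq_of_lt hr']

-- the two loop bodies agree
theorem pv_step_eq (padded_d : Int) :
    pvStepA padded_d = pvStepB (PySem.List.slice pvCartesianDims none (some padded_d))
      ((PySem.List.slice pvCartesianDims none (some padded_d)).length : Int) := by
  funext out_dict fn
  obtain ⟨order, names⟩ := fn
  unfold pvStepA pvStepB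
  by_cases h0 : order == 0
  · simp only [h0, if_pos]
  · simp only [h0, Bool.false_eq_true, if_neg, not_false_iff]
    congr 1
    -- A's inner loop over names, as a fold over the mapped core names
    rw [show ∀ (tfd : List String),
          names.foldl (fun (st : List String × PySem.Set String) field =>
            ((if PySem.Set.contains st.2 (pvRsplitCore field) then st.1
              else st.1 ++ tfd.map (fun dims => pvRsplitCore field ++ "_" ++ dims)),
             PySem.Set.add st.2 (pvRsplitCore field)))
            ([], PySem.Set.empty)
          = (names.map pvRsplitCore).foldl (fun (st : List String × PySem.Set String) c =>
            ((if PySem.Set.contains st.2 c then st.1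
              else st.1 ++ tfd.map (fun dims => c ++ "_" ++ dims)),
             PySem.Set.add st.2 c)) ([], PySem.Set.empty)
        from fun tfd => (List.foldl_map (f := pvRsplitCore)
          (g := fun (st : List String × PySem.Set String) c =>
            ((if PySem.Set.contains st.2 c then st.1
              else st.1 ++ tfd.map (fun dims => c ++ "_" ++ dims)),
             PySem.Set.add st.2 c))
          (l := names) (init := ([], PySem.Set.empty))).symm]
    rw [pv_inner_fold_eq]
    rw [show (PySem.Set.empty : PySem.Set String) = ([] : List String) from rfl]
    simp only [List.length_nil, List.drop_zero, List.nil_append]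
    rw [← PySem.Set.ofList_eq_foldl]
    -- B's dedup pass is the same ofList
    rw [pv_cores_eq]
    apply List.flatMap_congr
    intro c _
    -- the inner lists: A's joined product vs B's index decoding
    set pool := PySem.List.slice pvCartesianDims none (some padded_d) with hpool
    have htot : ((pool.length : Int) ^ order.toNat) = ((pool.length ^ order.toNat : Nat) : Int) := by
      push_cast; ring
    rw [htot, PySem.List.pyRange_one]
    simp only [Int.sub_zero, Int.toNat_natCast]
    rw [← pv_decode_eq_prod, List.map_map, List.map_map]
    apply List.map_congr_left
    intro k _
    simp only [Function.comp_def]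
    congr 1
    unfold pvDecode
    rw [pv_foldl_const, PySem.List.length_pyRange_one]
    have ho : ((order : Int) - 0).toNat = order.toNat := by simp
    rw [ho]
    have h0k : ((0:Int) + (k : Nat)) = ((k : Nat) : Int) := by simp
    rw [h0k, pv_iter_decode pool order.toNat k "", String.append_empty]

-- ===== VERDICT (by name: the statement is the Claim_ definition above) =====
theorem pad_cartesian_field_names_py_spec : Claim_equal_pad_cartesian_field_names_py := by
  intro field_names padded_d _ _
  unfold Spec_pad_cartesian_field_names_py pad_cartesian_field_names_py pad_cartesian_field_names_py_alt
  rw [pv_step_eq]
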